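-- pv_equiv track=rewrite | github.com/KAIMENYI2017/stock_exchange_web_scrapper | jamaica.py | page_num
-- ===== SOURCE A (Python) =====
-- def page_num(j,s,e):
--     page=[]
--     for i in range(s,e):
--         j=j-10
--         if j>0:
--             j=j
--             page.append(j)
--         else:
--             j=0
--             page.append( j)
--     return page
-- ===== SOURCE B (Python) =====
-- def page_num(j, s, e):
--     n = max(e - s, 0)
--     p = min(n, max((j - 1) // 10, 0))
--     return [j - 10 * k for k in range(1, p + 1)] + [0] * (n - p)
-- ===== Notes on version B (the rewrite author's own statement) =====
-- stated objective: simpler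
-- what changed: Replaced A's element-by-element loop with a mutated accumulator by a staged construction: compute the count p of positive entries once by floor division, then concatenate the descending arithmetic run [j-10, ..., j-10p] with a literal block of zeros.
import Mathlib
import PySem

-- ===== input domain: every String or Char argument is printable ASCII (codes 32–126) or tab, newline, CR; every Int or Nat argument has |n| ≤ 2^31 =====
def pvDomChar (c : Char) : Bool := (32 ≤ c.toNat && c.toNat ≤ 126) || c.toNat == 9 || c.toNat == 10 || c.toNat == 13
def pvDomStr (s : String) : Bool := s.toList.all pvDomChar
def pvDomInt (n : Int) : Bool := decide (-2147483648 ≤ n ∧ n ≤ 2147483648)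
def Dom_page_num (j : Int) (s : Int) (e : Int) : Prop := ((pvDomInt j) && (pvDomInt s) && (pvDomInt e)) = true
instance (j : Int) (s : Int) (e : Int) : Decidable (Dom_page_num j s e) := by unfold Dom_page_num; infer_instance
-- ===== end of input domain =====

-- B replaces A's running accumulator by a staged construction: it first computes the count p of positive entries by floor division, then concatenates the descending run with a block of zeros (objective: simpler).


-- ===== PORT A =====
-- for i in range(s,e): j=j-10; if j>0: append j else: j=0; append 0
def page_num (j : Int) (s : Int) (e : Int) : List Int :=
  ((PySem.List.pyRange s e 1).foldl
    (fun st _ =>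
      let j' := st.1 - 10
      if j' > 0 then (j', st.2 ++ [j']) else ((0 : Int), st.2 ++ [(0 : Int)]))
    (j, ([] : List Int))).2

-- ===== PORT B =====
-- n = max(e-s,0); p = min(n, max((j-1)//10, 0)); [j-10*k for k in range(1,p+1)] + [0]*(n-p)
def page_num_alt (j : Int) (s : Int) (e : Int) : List Int :=
  let n := max (e - s) 0
  let p := min n (max (PySem.Int.floordiv (j - 1) 10) 0)
  ((PySem.List.pyRange 1 (p + 1) 1).map (fun k => j - 10 * k)) ++ List.replicate (n - p).toNat 0

-- ===== PRECONDITION & SPEC =====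
def Spec_page_num (j : Int) (s : Int) (e : Int) (out : List Int) : Prop := out = page_num_alt j s e
instance (j : Int) (s : Int) (e : Int) (out : List Int) : Decidable (Spec_page_num j s e out) := by unfold Spec_page_num; infer_instance

-- ===== CLAIM (what is proved, stated in full; the proofs are below) =====
def Claim_equal_page_num : Prop := ∀ (j : Int) (s : Int) (e : Int), Dom_page_num j s e → Spec_page_num j s e (page_num j s e)

-- ===== LEMMAS AND PROOFS =====

-- A's fold over any index list produces the clamped closed-form list, depending only on the list's length
lemma foldA_closed (l : List Int) (j : Int) (acc : List Int) :
    ((l.foldl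
      (fun st _ =>
        let j' := st.1 - 10
        if j' > 0 then (j', st.2 ++ [j']) else ((0 : Int), st.2 ++ [(0 : Int)]))
      (j, acc)).2)
    = acc ++ (List.range l.length).map (fun (k : Nat) => max (j - 10 * ((k : Int) + 1)) 0) := by
  induction l generalizing j acc with
  | nil => simp
  | cons x xs ih =>
    simp only [List.foldl_cons]
    have hstep :
        (let j' := j - 10
         if j' > 0 then (j', acc ++ [j']) else ((0 : Int), acc ++ [(0 : Int)]))
        = (max (j - 10) 0, acc ++ [max (j - 10) 0]) := by
      by_cases h : j - 10 > 0
      · simp only [if_pos h]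
        rw [max_eq_left (le_of_lt h)]
      · simp only [if_neg h]
        rw [max_eq_right (by omega : j - 10 ≤ 0)]
    rw [hstep, ih]
    rw [List.length_cons, List.range_succ_eq_map]
    simp only [List.map_cons, List.map_map, List.append_assoc, List.singleton_append]
    have h0 : max (j - 10) 0 = max (j - 10 * (((0 : Nat) : Int) + 1)) 0 := by norm_num
    have ht : List.map (fun (k : Nat) => max (max (j - 10) 0 - 10 * ((k : Int) + 1)) 0) (List.range xs.length)
        = List.map ((fun (k : Nat) => max (j - 10 * ((k : Int) + 1)) 0) ∘ Nat.succ) (List.range xs.length) := by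
      apply List.map_congr_left
      intro k _
      simp only [Function.comp_apply, Nat.succ_eq_add_one]
      have hk : (0 : Int) ≤ (k : Int) := Int.natCast_nonneg k
      push_cast
      omega
    exact congrArg (acc ++ ·) (congrArg₂ List.cons h0 ht)

-- B's staged list equals the same clamped closed form
lemma altB_closed (j : Int) (s : Int) (e : Int) :
    page_num_alt j s e
    = (List.range (max (e - s) 0).toNat).map (fun (k : Nat) => max (j - 10 * ((k : Int) + 1)) 0) := by
  unfold page_num_alt
  set n : Int := max (e - s) 0 with hn
  set q : Int := PySem.Int.floordiv (j - 1) 10 with hqdef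
  have hq : q = (j - 1) / 10 := PySem.Int.floordiv_eq_ediv_of_pos (by norm_num)
  have hdm := Int.mul_ediv_add_emod (j - 1) 10
  have hm0 : 0 ≤ (j - 1) % 10 := Int.emod_nonneg _ (by norm_num)
  have hm1 : (j - 1) % 10 < 10 := Int.emod_lt_of_pos _ (by norm_num)
  have hql : 10 * q ≤ j - 1 := by omega
  have hqu : j - 1 < 10 * q + 10 := by omega
  have hn0 : 0 ≤ n := le_max_right _ _
  set p : Int := min n (max q 0) with hp
  have hp0 : 0 ≤ p := le_min hn0 (le_max_right _ _)
  have hpn : p ≤ n := min_le_left _ _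
  apply List.ext_getElem
  · simp [PySem.List.length_pyRange_one]
    omega
  · intro i h1 h2
    have hi : i < n.toNat := by
      simpa using h2
    by_cases hip : i < p.toNat
    · rw [List.getElem_append_left (by simp [PySem.List.length_pyRange_one]; omega)]
      rw [List.getElem_map, List.getElem_map, PySem.List.getElem_pyRange_one, List.getElem_range]
      have hiq : (i : Int) < q := by omega
      rw [max_eq_left (by omega)]
      ring
    · rw [List.getElem_append_right (by simp [PySem.List.length_pyRange_one]; omega)]
      rw [List.getElem_replicate, List.getElem_map, List.getElem_range]
      rw [max_eq_right (by omega)]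

-- ===== VERDICT (by name: the statement is the Claim_ definition above) =====
theorem page_num_spec : Claim_equal_page_num := by
  intro j s e _
  unfold Spec_page_num page_num
  rw [foldA_closed, PySem.List.length_pyRange_one, altB_closed]
  rw [show (max (e - s) 0).toNat = (e - s).toNat from by omega]
  simp
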